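-- pv_equiv track=rewrite | github.com/joliver1981/aihub-client-ai | SmartContentRenderer_hybrid.py | _contains_table_pattern
-- ===== SOURCE A (Python) =====
-- def _contains_table_pattern(content: str) -> bool:
--     """Check if content likely contains table data."""
--     # Markdown table
--     if '|' in content and content.count('|') >= 4:
--         return True
--     # Whitespace-aligned table
--     lines = content.split('\n')
--     aligned_lines = sum(1 for l in lines if '  ' in l and len(l.split()) >= 3)
--     if aligned_lines >= 3:
--         return True
--     return False
-- ===== SOURCE B (Python) =====
-- def _contains_table_pattern(content: str) -> bool:
--     """Check if content likely contains table data (single pass over the lines)."""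
--     pipes = 0
--     aligned = 0
--     for l in content.split('\n'):
--         pipes += l.count('|')
--         if '  ' in l and len(l.split()) >= 3:
--             aligned += 1
--         if pipes >= 4 or aligned >= 3:
--             return True
--     return False
-- ===== Notes on version B (the rewrite author's own statement) =====
-- stated objective: alternative
-- what changed: Replaces A's two independent passes (a whole-string pipe count, then a full generator-sum over the lines) by one loop over the lines that maintains both counters (per-line pipe totals and aligned-line count) and returns True as soon as either threshold is reached.
import Mathlib
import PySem

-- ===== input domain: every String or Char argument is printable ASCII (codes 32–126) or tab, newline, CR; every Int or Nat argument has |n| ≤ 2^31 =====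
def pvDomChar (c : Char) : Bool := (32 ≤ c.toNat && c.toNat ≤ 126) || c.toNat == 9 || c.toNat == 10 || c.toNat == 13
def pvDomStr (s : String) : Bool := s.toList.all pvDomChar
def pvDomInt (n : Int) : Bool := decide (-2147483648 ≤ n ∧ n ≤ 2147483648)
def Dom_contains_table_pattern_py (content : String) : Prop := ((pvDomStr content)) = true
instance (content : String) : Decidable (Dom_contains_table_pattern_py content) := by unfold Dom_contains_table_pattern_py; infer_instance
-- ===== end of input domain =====

-- B merges A's two separate scans (whole-string '|' count, then a sum over the lines)
-- into one loop over the lines maintaining both counters with early exit (objective: alternative).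


-- ===== PORT A =====
def contains_table_pattern_py (content : String) : Bool :=
  -- if '|' in content and content.count('|') >= 4: return True
  if PySem.Str.isIn "|" content && decide (4 ≤ PySem.Str.count content "|") then true
  else
    -- lines = content.split('\n')
    let lines := (PySem.Str.split? content "\n").getD []
    -- aligned_lines = sum(1 for l in lines if '  ' in l and len(l.split()) >= 3)
    let aligned_lines : Int := lines.foldl (fun acc l =>
      if PySem.Str.isIn "  " l && decide (3 ≤ (PySem.Str.split₀ l).length) then acc + 1 else acc) 0
    if 3 ≤ aligned_lines then true else false

-- ===== PORT B =====
-- the for-loop of Source B: state (pipes, aligned), early return True on either threshold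
def pvAltLoop : List String → Int → Int → Bool
  | [], _, _ => false
  | l :: rest, pipes, aligned =>
      let pipes' := pipes + (PySem.Str.count l "|" : Int)
      let aligned' := if PySem.Str.isIn "  " l && decide (3 ≤ (PySem.Str.split₀ l).length)
                      then aligned + 1 else aligned
      if 4 ≤ pipes' ∨ 3 ≤ aligned' then true else pvAltLoop rest pipes' aligned'

def contains_table_pattern_py_alt (content : String) : Bool :=
  pvAltLoop ((PySem.Str.split? content "\n").getD []) 0 0

-- ===== PRECONDITION & SPEC =====
def Spec_contains_table_pattern_py (content : String) (out : Bool) : Prop := out = contains_table_pattern_py_alt content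
instance (content : String) (out : Bool) : Decidable (Spec_contains_table_pattern_py content out) := by unfold Spec_contains_table_pattern_py; infer_instance

-- ===== CLAIM (what is proved, stated in full; the proofs are below) =====
def Claim_equal_contains_table_pattern_py : Prop := ∀ (content : String), Dom_contains_table_pattern_py content → Spec_contains_table_pattern_py content (contains_table_pattern_py content)

-- ===== LEMMAS AND PROOFS =====

-- counting a single character: PySem.Chars.count agrees with List.count
theorem pv_count_go_pipe (l : List Char) : ∀ (fuel acc : Nat), l.length ≤ fuel →
    PySem.Chars.count.go ['|'] fuel l acc = acc + l.count '|' := by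
  induction l with
  | nil =>
      intro fuel acc _
      cases fuel <;> simp [PySem.Chars.count.go]
  | cons c t ih =>
      intro fuel acc h
      cases fuel with
      | zero => simp at h
      | succ f =>
        simp only [PySem.Chars.count.go]
        by_cases hc : c = '|'
        · subst hc
          rw [if_pos (by simp [List.isPrefixOf])]
          have hd : List.drop (['|'] : List Char).length ('|' :: t) = t := by simp
          rw [hd]
          have := ih f (acc + 1) (by simpa using Nat.le_of_succ_le_succ h)
          simpa [List.count_cons, Nat.add_comm, Nat.add_assoc, Nat.add_left_comm] using this
        · rw [if_neg (by simp [List.isPrefixOf]; exact fun hh => hc hh.symm)]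
          have := ih f acc (by simpa using Nat.le_of_succ_le_succ h)
          simpa [List.count_cons, hc] using this

theorem pv_count_pipe (s : List Char) : PySem.Chars.count s ['|'] = s.count '|' := by
  simpa [PySem.Chars.count] using pv_count_go_pipe s s.length 0 le_rfl

-- splitting on '\n' preserves the total number of '|' characters
theorem pv_split_go_sum (l : List Char) : ∀ (cur : List Char) (acc : List (List Char)) (fuel : Nat),
    l.length ≤ fuel →
    ((PySem.Chars.splitOn.go ['\n'] fuel l cur acc).map (fun p => p.count '|')).sum
      = (acc.map (fun p => p.count '|')).sum + cur.count '|' + l.count '|' := by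
  induction l with
  | nil =>
      intro cur acc fuel _
      cases fuel <;> simp [PySem.Chars.splitOn.go, List.sum_reverse, Nat.add_comm]
  | cons c t ih =>
      intro cur acc fuel h
      cases fuel with
      | zero => simp at h
      | succ f =>
        simp only [PySem.Chars.splitOn.go]
        by_cases hc : c = '\n'
        · subst hc
          rw [if_pos (by simp [List.isPrefixOf])]
          have hd : List.drop (['\n'] : List Char).length ('\n' :: t) = t := by simp
          rw [hd]
          have := ih [] ((List.reverse cur) :: acc) f (by simpa using Nat.le_of_succ_le_succ h)
          rw [this]
          simp [List.count_cons, Nat.add_comm, Nat.add_assoc, Nat.add_left_comm]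
        · rw [if_neg (by simp [List.isPrefixOf]; exact fun hh => hc hh.symm)]
          have := ih (c :: cur) acc f (by simpa using Nat.le_of_succ_le_succ h)
          rw [this]
          simp [List.count_cons, hc, Nat.add_comm, Nat.add_assoc, Nat.add_left_comm]

theorem pv_split_sum (s : List Char) :
    ((PySem.Chars.splitOn s ['\n']).map (fun p => p.count '|')).sum = s.count '|' := by
  simpa [PySem.Chars.splitOn] using pv_split_go_sum s [] [] (s.length + 1) (by omega)

-- the single-pass loop of B computes the OR of the two threshold tests on the totals
theorem pv_altLoop_eq (lines : List String) : ∀ (p a : Int), p < 4 → a < 3 →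
    pvAltLoop lines p a
      = decide ((4 : Int) ≤ p + ((lines.map (fun l => (PySem.Str.count l "|" : Int))).sum)
              ∨ (3 : Int) ≤ a + (lines.countP (fun l => PySem.Str.isIn "  " l && decide (3 ≤ (PySem.Str.split₀ l).length)) : Int)) := by
  induction lines with
  | nil =>
      intro p a hp ha
      simp [pvAltLoop]
      omega
  | cons l rest ih =>
      intro p a hp ha
      have hsum : (0 : Int) ≤ (rest.map (fun l => (PySem.Str.count l "|" : Int))).sum := by
        apply List.sum_nonneg
        intro x hx
        simp only [List.mem_map] at hx
        obtain ⟨y, _, hy⟩ := hx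
        omega
      simp only [pvAltLoop, List.map_cons, List.sum_cons, List.countP_cons]
      by_cases hl : (PySem.Str.isIn "  " l && decide (3 ≤ (PySem.Str.split₀ l).length)) = true
      · simp only [hl, if_true]
        by_cases hstop : (4 : Int) ≤ p + (PySem.Str.count l "|" : Int) ∨ (3 : Int) ≤ a + 1
        · rw [if_pos hstop]
          symm
          simp only [decide_eq_true_iff]
          push_cast
          omega
        · rw [if_neg hstop]
          rw [ih _ _ (by omega) (by omega)]
          refine decide_eq_decide.mpr ?_
          push_cast
          omega
      · simp only [hl, if_false, Bool.false_eq_true]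
        by_cases hstop : (4 : Int) ≤ p + (PySem.Str.count l "|" : Int) ∨ (3 : Int) ≤ a
        · rw [if_pos hstop]
          symm
          simp only [decide_eq_true_iff]
          push_cast
          omega
        · rw [if_neg hstop]
          rw [ih _ _ (by omega) ha]
          refine decide_eq_decide.mpr ?_
          push_cast
          omega

-- the lines produced by split? "\n", mapped back to char lists, are Chars.splitOn
theorem pv_lines_toList (content : String) :
    (((PySem.Str.split? content "\n").getD []).map String.toList)
      = PySem.Chars.splitOn content.toList ['\n'] := by
  have h := PySem.Str.split?_map content "\n"
  rw [show "\n".toList = ['\n'] from rfl] at h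
  simp only [PySem.Chars.split?] at h
  rcases hs : PySem.Str.split? content "\n" with _ | xs
  · rw [hs] at h; simp at h
  · rw [hs] at h; simpa using h

-- 4 or more pipes means '|' occurs in content
theorem pv_isIn_of_count (content : String) (h : 4 ≤ PySem.Str.count content "|") :
    PySem.Str.isIn "|" content = true := by
  rw [PySem.Str.count_eq, show "|".toList = ['|'] from rfl] at h
  have hc : 0 < content.toList.count '|' := by
    have := pv_count_pipe content.toList
    omega
  have hm : '|' ∈ content.toList := List.count_pos_iff.mp hc
  obtain ⟨s, t, hst⟩ := List.append_of_mem hm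
  rw [PySem.Str.isIn_iff_infix]
  exact ⟨s, t, by rw [hst, show "|".toList = ['|'] from rfl]; simp⟩

-- the per-line pipe totals sum to the whole-string count
theorem pv_sum_lines (content : String) :
    ((((PySem.Str.split? content "\n").getD []).map (fun l => (PySem.Str.count l "|" : Int))).sum)
      = (PySem.Str.count content "|" : Int) := by
  have hmap : (((PySem.Str.split? content "\n").getD []).map (fun l => (PySem.Str.count l "|" : Int)))
      = ((((PySem.Str.split? content "\n").getD []).map String.toList).map (fun p => (p.count '|' : Int))) := by
    simp only [List.map_map]
    apply List.map_congr_left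
    intro x _
    simp [PySem.Str.count_eq, pv_count_pipe]
  rw [hmap, pv_lines_toList]
  rw [PySem.Str.count_eq, show "|".toList = ['|'] from rfl, pv_count_pipe]
  have hcast : ∀ (L : List (List Char)), ((L.map (fun p => (p.count '|' : Int))).sum) = (((L.map (fun p => p.count '|')).sum : Nat) : Int) := by
    intro L
    induction L with
    | nil => simp
    | cons x xs ihh =>
        simp only [List.map_cons, List.sum_cons, ihh]
        push_cast
        ring
  rw [show (fun p : List Char => (p.count '|' : Int)) = (fun p : List Char => ((List.count '|' p : Nat) : Int)) from rfl]
  rw [hcast, pv_split_sum]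

-- ===== VERDICT (by name: the statement is the Claim_ definition above) =====
theorem contains_table_pattern_py_spec : Claim_equal_contains_table_pattern_py := by
  intro content _
  unfold Spec_contains_table_pattern_py contains_table_pattern_py_alt
  rw [pv_altLoop_eq _ 0 0 (by omega) (by omega), pv_sum_lines]
  show contains_table_pattern_py content = _
  simp only [contains_table_pattern_py, PySem.List.foldl_if_add_one]
  by_cases h4 : 4 ≤ PySem.Str.count content "|"
  · rw [if_pos (by rw [pv_isIn_of_count content h4]
                   simp only [Bool.true_and, decide_eq_true_eq]
                   exact h4)]
    symm
    simp only [decide_eq_true_iff]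
    left
    push_cast
    omega
  · rw [if_neg (by simp only [Bool.and_eq_true, decide_eq_true_eq]
                   exact fun hh => h4 hh.2)]
    by_cases h3 : (3 : Int) ≤ 0 + (((PySem.Str.split? content "\n").getD []).countP (fun l => PySem.Str.isIn "  " l && decide (3 ≤ (PySem.Str.split₀ l).length)) : Int)
    · rw [if_pos (by push_cast at h3 ⊢; omega)]
      symm
      simp only [decide_eq_true_iff]
      right
      exact h3
    · rw [if_neg (by push_cast at h3 ⊢; omega)]
      symm
      simp only [decide_eq_false_iff_not]
      push_neg
      refine ⟨by omega, by omega⟩
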